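-- pv_equiv track=rewrite | github.com/hyunolike/coding-test | hyunho/week1/3986좋은단어.py | check
-- ===== SOURCE A (Python) =====
-- def check(word):
--     temp = []
--     for i in range(len(word)):
--         if temp and temp[-1] == word[i]:
--             temp.pop()
--         else:
--             temp.append(word[i])
--     if not temp:
--         return True
--     else:
--         return False
-- ===== SOURCE B (Python) =====
-- def check(word):
--     cur = word
--     while True:
--         nxt = []
--         i = 0
--         while i < len(cur):
--             if i + 1 < len(cur) and cur[i] == cur[i + 1]:
--                 i += 2
--             else:
--                 nxt.append(cur[i])
--                 i += 1
--         if len(nxt) == len(cur):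
--             return not nxt
--         cur = nxt
-- ===== Notes on version B (the rewrite author's own statement) =====
-- stated objective: alternative
-- what changed: Replaces the single stack pass by a multi-pass fixpoint: each pass sweeps the word left to right deleting every adjacent equal pair it meets, repeated until a pass changes nothing; the result is empty iff the stack would be.
import Mathlib
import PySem

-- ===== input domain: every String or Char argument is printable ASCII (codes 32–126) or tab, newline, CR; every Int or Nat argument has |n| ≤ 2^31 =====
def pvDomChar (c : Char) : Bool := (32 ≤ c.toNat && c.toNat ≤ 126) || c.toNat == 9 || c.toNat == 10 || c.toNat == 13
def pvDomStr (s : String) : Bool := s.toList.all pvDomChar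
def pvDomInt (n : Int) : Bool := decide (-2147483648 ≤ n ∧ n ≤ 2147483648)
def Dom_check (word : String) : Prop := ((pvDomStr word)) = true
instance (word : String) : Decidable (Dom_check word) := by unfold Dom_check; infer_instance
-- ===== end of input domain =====

-- B replaces the single stack pass by a multi-pass adjacent-pair-cancellation fixpoint
-- (alternative decomposition, same final word, hence the same Boolean answer).

-- ===== PORT A =====
-- temp-update for one character: pop if the last element equals it, else append.
def checkStep (temp : List Char) (c : Char) : List Char :=
  if temp ≠ [] ∧ temp.getLast? = some c then temp.dropLast else temp ++ [c]

def check (word : String) : Bool :=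
  ((word.toList.foldl checkStep []) = ([] : List Char))

-- ===== PORT B =====
-- one left-to-right pass: delete both characters of every adjacent equal pair met.
def onePass : List Char → List Char
  | [] => []
  | [a] => [a]
  | a :: b :: t => if a = b then onePass t else a :: onePass (b :: t)

theorem onePass_length_le : ∀ l : List Char, (onePass l).length ≤ l.length := by
  intro l
  induction l using onePass.induct with
  | case1 => simp [onePass]
  | case2 a => simp [onePass]
  | case3 b t ih => simp [onePass]; omega
  | case4 a b t h ih =>
      have := ih
      simp only [onePass, if_neg h, List.length_cons] at this ⊢
      omega

theorem onePass_length_lt : ∀ l : List Char, onePass l ≠ l → (onePass l).length < l.length := by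
  intro l
  induction l using onePass.induct with
  | case1 => simp [onePass]
  | case2 a => simp [onePass]
  | case3 b t ih =>
      intro _
      have := onePass_length_le t
      simp [onePass]; omega
  | case4 a b t h ih =>
      intro hne
      have hne' : onePass (b :: t) ≠ b :: t := by
        intro he; apply hne; simp [onePass, h, he]
      have := ih hne'
      simp only [onePass, if_neg h, List.length_cons] at *
      omega

-- repeat the pass until nothing changes.
def reduceFix (l : List Char) : List Char :=
  if h : onePass l = l then l else reduceFix (onePass l)
termination_by l.length
decreasing_by exact onePass_length_lt l h

def check_alt (word : String) : Bool :=
  (reduceFix word.toList = ([] : List Char))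

-- ===== PRECONDITION & SPEC =====
def Spec_check (word : String) (out : Bool) : Prop := out = check_alt word
instance (word : String) (out : Bool) : Decidable (Spec_check word out) := by unfold Spec_check; infer_instance

-- ===== CLAIM (what is proved, stated in full; the proofs are below) =====
def Claim_equal_check : Prop := ∀ (word : String), Dom_check word → Spec_check word (check word)

-- ===== LEMMAS AND PROOFS =====

-- the stack machine with the stack kept top-first (reverse of A's temp)
def S : List Char → List Char → List Char
  | [], acc => acc
  | c :: t, acc => if acc.head? = some c then S t acc.tail else S t (c :: acc)

theorem S_cons (c : Char) (t acc : List Char) :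
    S (c :: t) acc = if acc.head? = some c then S t acc.tail else S t (c :: acc) := rfl

theorem foldl_checkStep_eq_S :
    ∀ (l acc : List Char), l.foldl checkStep acc = (S l acc.reverse).reverse := by
  intro l
  induction l with
  | nil => intro acc; simp [S]
  | cons c t ih =>
      intro acc
      by_cases h : acc.getLast? = some c
      · have hne : acc ≠ [] := by intro he; subst he; simp at h
        have hstep : checkStep acc c = acc.dropLast := by simp [checkStep, hne, h]
        have hhead : acc.reverse.head? = some c := by rwa [List.head?_reverse]
        rw [List.foldl_cons, hstep, ih, S_cons, if_pos hhead, List.tail_reverse]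
      · have hstep : checkStep acc c = acc ++ [c] := by
          by_cases hne : acc = [] <;> simp [checkStep, hne, h]
        have hhead : acc.reverse.head? ≠ some c := by rwa [List.head?_reverse]
        rw [List.foldl_cons, hstep, ih, S_cons, if_neg hhead, List.reverse_append]
        simp

-- one pass does not change what the stack machine computes (acc never has adjacent equals)
theorem S_onePass :
    ∀ (l acc : List Char), acc.IsChain (· ≠ ·) → S (onePass l) acc = S l acc := by
  intro l
  induction l using onePass.induct with
  | case1 => intro acc _; rfl
  | case2 a => intro acc _; rfl
  | case3 b t ih =>
      intro acc hacc
      rw [onePass, if_pos rfl]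
      match acc, hacc with
      | [], _ =>
          rw [S_cons, if_neg (by simp), S_cons, if_pos (by simp)]
          exact ih [] (by simp)
      | x :: r, hacc =>
          by_cases hx : x = b
          · subst hx
            have hr : r.head? ≠ some x := by
              intro hr
              rw [List.isChain_cons] at hacc
              exact (hacc.1 x hr) rfl
            rw [S_cons, if_pos (by simp), List.tail_cons, S_cons, if_neg hr]
            exact ih (x :: r) hacc
          · have hx' : (x :: r).head? ≠ some b := by simp [hx]
            rw [S_cons, if_neg hx', S_cons, if_pos (by simp), List.tail_cons]
            exact ih (x :: r) hacc
  | case4 a b t h ih =>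
      intro acc hacc
      rw [onePass, if_neg h]
      by_cases hx : acc.head? = some a
      · rw [S_cons, if_pos hx, S_cons, if_pos hx]
        exact ih acc.tail hacc.tail
      · rw [S_cons, if_neg hx, S_cons, if_neg hx]
        refine ih (a :: acc) ?_
        rw [List.isChain_cons]
        refine ⟨?_, hacc⟩
        intro y hy he
        exact hx (by rw [hy, he])

-- a word with no adjacent equal pair is left alone by the stack machine
theorem S_chain :
    ∀ (r acc : List Char), r.IsChain (· ≠ ·) →
      (∀ c, r.head? = some c → acc.head? ≠ some c) → S r acc = r.reverse ++ acc := by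
  intro r
  induction r with
  | nil => intro acc _ _; simp [S]
  | cons c t ih =>
      intro acc hch hh
      have hne : acc.head? ≠ some c := hh c rfl
      rw [S_cons, if_neg hne]
      rw [ih (c :: acc) hch.tail ?_]
      · simp
      · intro d hd he
        simp only [List.head?_cons, Option.some.injEq] at he
        rw [List.isChain_cons] at hch
        exact (hch.1 d hd) (by rw [he])

theorem onePass_fix_chain : ∀ l : List Char, onePass l = l → l.IsChain (· ≠ ·) := by
  intro l
  induction l using onePass.induct with
  | case1 => intro _; simp
  | case2 a => intro _; simp
  | case3 b t ih =>
      intro he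
      exfalso
      have h1 := onePass_length_le t
      rw [onePass, if_pos rfl] at he
      have : (onePass t).length = t.length + 2 := by rw [he]; simp
      omega
  | case4 a b t h ih =>
      intro he
      rw [onePass, if_neg h] at he
      have ht : onePass (b :: t) = b :: t := by
        have := congrArg List.tail he; simpa using this
      rw [List.isChain_cons]
      refine ⟨?_, ih ht⟩
      intro y hy
      simp only [List.head?_cons, Option.mem_def, Option.some.injEq] at hy
      subst hy
      exact h

theorem reduceFix_fix : ∀ l : List Char, onePass (reduceFix l) = reduceFix l := by
  intro l
  induction l using reduceFix.induct with
  | case1 l h => rw [reduceFix, dif_pos h]; exact h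
  | case2 l h ih => rw [reduceFix, dif_neg h]; exact ih

theorem S_reduceFix :
    ∀ (l acc : List Char), acc.IsChain (· ≠ ·) → S (reduceFix l) acc = S l acc := by
  intro l
  induction l using reduceFix.induct with
  | case1 l h => intro acc _; rw [reduceFix, dif_pos h]
  | case2 l h ih =>
      intro acc hacc
      rw [reduceFix, dif_neg h, ih acc hacc, S_onePass l acc hacc]

theorem foldl_eq_reduceFix : ∀ l : List Char, l.foldl checkStep [] = reduceFix l := by
  intro l
  have h1 := foldl_checkStep_eq_S l []
  have h2 := (S_reduceFix l [] (by simp)).symm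
  have h3 : S (reduceFix l) ([] : List Char) = (reduceFix l).reverse ++ [] := by
    refine S_chain _ _ (onePass_fix_chain _ (reduceFix_fix l)) ?_
    intro c _ hc; simp at hc
  rw [h1, List.reverse_nil, h2, h3]
  simp

-- ===== VERDICT (by name: the statement is the Claim_ definition above) =====
theorem check_spec : Claim_equal_check := by
  intro word _
  unfold Spec_check check check_alt
  rw [foldl_eq_reduceFix]
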